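-- pv_equiv track=rewrite | github.com/karansingla06/ice-ner | ice_commons/er/utils/crf_utils.py | get_dandhyp
-- ===== SOURCE A (Python) =====
-- def get_dandhyp(token, p='-'):
--     bd = False
--     bdd = False
--     for c in token:
--         if c.isdigit():
--             bd = True
--         elif c == p:
--             bdd = True
--         else:
--             return False
--     return bd and bdd
-- ===== SOURCE B (Python) =====
-- def get_dandhyp(token, p='-'):
--     rest = ''.join(c for c in token if not c.isdigit())
--     return rest != token and rest != '' and rest == p * len(rest)
-- ===== Notes on version B (the rewrite author's own statement) =====
-- stated objective: simpler
-- what changed: Instead of A's flag-accumulating early-return loop, B deletes the digit characters and decides by whole-string comparisons: the residue must differ from token (a digit was removed), be nonempty, and equal the separator replicated to its length.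
import Mathlib
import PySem

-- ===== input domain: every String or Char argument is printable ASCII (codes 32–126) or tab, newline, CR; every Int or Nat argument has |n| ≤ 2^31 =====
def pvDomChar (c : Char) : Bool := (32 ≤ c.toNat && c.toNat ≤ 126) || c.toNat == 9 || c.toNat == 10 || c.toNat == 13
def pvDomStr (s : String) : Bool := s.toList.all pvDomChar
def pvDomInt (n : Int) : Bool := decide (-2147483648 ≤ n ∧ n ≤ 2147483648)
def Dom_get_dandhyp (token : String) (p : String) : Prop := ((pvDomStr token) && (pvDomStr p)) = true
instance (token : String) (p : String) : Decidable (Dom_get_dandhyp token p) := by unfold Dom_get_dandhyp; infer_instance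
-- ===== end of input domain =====

-- B replaces A's flag-accumulating early-return loop with residue comparison: delete the
-- digits, then the token is valid iff the residue differs from the token, is nonempty,
-- and equals the separator string replicated to the residue's length (objective: simpler).
-- A is total, so equivalence is proved on all inputs (no Pre_).

-- ===== PORT A =====
-- A's for-loop with its two flags and early return, as structural recursion over the
-- characters; Python's 1-char-string-vs-p comparison 'c == p' is ported as the exact
-- char-list equality [c] == p.toList.
def pvGoA : List Char → String → Bool → Bool → Bool
  | [], _, bd, bdd => bd && bdd
  | c :: rest, p, bd, bdd =>
    if PySem.Chars.isdigit c then pvGoA rest p true bdd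
    else if [c] == p.toList then pvGoA rest p bd true
    else false

def get_dandhyp (token : String) (p : String) : Bool :=
  pvGoA token.toList p false false

-- ===== PORT B =====
-- Source B: rest = ''.join(c for c in token if not c.isdigit())
--       return rest != token and rest != '' and rest == p * len(rest)
-- String comparisons are ported as the exact comparisons of the underlying char lists;
-- p * len(rest) is PySem.List.pyRepeat on p's chars.
def get_dandhyp_alt (token : String) (p : String) : Bool :=
  let rest : List Char := token.toList.filter (fun c => !PySem.Chars.isdigit c)
  (rest != token.toList) && (rest != ([] : List Char)) &&
    (rest == PySem.List.pyRepeat p.toList (rest.length : Int))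

-- ===== PRECONDITION & SPEC =====
def Spec_get_dandhyp (token : String) (p : String) (out : Bool) : Prop := out = get_dandhyp_alt token p
instance (token : String) (p : String) (out : Bool) : Decidable (Spec_get_dandhyp token p out) := by unfold Spec_get_dandhyp; infer_instance

-- ===== CLAIM (what is proved, stated in full; the proofs are below) =====
def Claim_equal_get_dandhyp : Prop := ∀ (token : String) (p : String), Dom_get_dandhyp token p → Spec_get_dandhyp token p (get_dandhyp token p)

-- ===== LEMMAS AND PROOFS =====

-- A's loop characterised: a digit was seen (or bd came in true), a separator character was
-- seen (or bdd came in true), and every character is a digit or equal to p.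
theorem pvGoA_eq : ∀ (ts : List Char) (p : String) (bd bdd : Bool),
    pvGoA ts p bd bdd =
      ((bd || ts.any PySem.Chars.isdigit) &&
        ((bdd || ts.any (fun c => !PySem.Chars.isdigit c && ([c] == p.toList))) &&
          ts.all (fun c => PySem.Chars.isdigit c || ([c] == p.toList))))
  | [], p, bd, bdd => by simp [pvGoA]
  | c :: rest, p, bd, bdd => by
    by_cases h : PySem.Chars.isdigit c = true
    · simp [pvGoA, h, pvGoA_eq rest p true bdd]
    · by_cases h2 : [c] = p.toList
      · simp [pvGoA, h, h2, pvGoA_eq rest p bd true]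
      · simp [pvGoA, h, h2]

-- The residue equals p replicated to its own length iff p is a single character and every
-- residue character is that character (for a nonempty residue).
theorem rest_eq_pyRepeat_iff (rest ps : List Char) (hne : rest ≠ []) :
    rest = PySem.List.pyRepeat ps (rest.length : Int) ↔
      ∃ c, ps = [c] ∧ ∀ x ∈ rest, x = c := by
  constructor
  · intro h
    have hlen : rest.length = rest.length * ps.length := by
      conv_lhs => rw [h]
      simp [PySem.List.pyRepeat, List.length_flatten, List.map_replicate]
    have hps : ps.length = 1 := by
      have h0 : 0 < rest.length := List.length_pos_iff.mpr hne
      nlinarith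
    obtain ⟨c, rfl⟩ : ∃ c, ps = [c] := by
      cases ps with
      | nil => simp at hps
      | cons a t => cases t with
        | nil => exact ⟨a, rfl⟩
        | cons b u => simp at hps
    rw [PySem.List.pyRepeat_singleton] at h
    exact ⟨c, rfl, fun x hx => ((List.eq_replicate_iff.mp (by simpa using h)).2 x hx)⟩
  · rintro ⟨c, rfl, hall⟩
    rw [PySem.List.pyRepeat_singleton]
    exact List.eq_replicate_iff.mpr ⟨by simp, hall⟩

-- ===== VERDICT (by name: the statement is the Claim_ definition above) =====
theorem get_dandhyp_spec : Claim_equal_get_dandhyp := by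
  intro token p _
  unfold Spec_get_dandhyp get_dandhyp get_dandhyp_alt
  rw [pvGoA_eq, Bool.eq_iff_iff]
  set ts := token.toList with hts
  simp only [Bool.and_eq_true, Bool.or_eq_true, Bool.false_or, List.any_eq_true,
    List.all_eq_true, bne_iff_ne, beq_iff_eq, Bool.not_eq_true', ne_eq]
  have hself : (ts.filter (fun c => !PySem.Chars.isdigit c) = ts) ↔
      ∀ c ∈ ts, PySem.Chars.isdigit c = false := by
    rw [List.filter_eq_self]; simp
  have hnil : (ts.filter (fun c => !PySem.Chars.isdigit c) = []) ↔
      ∀ c ∈ ts, PySem.Chars.isdigit c = true := by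
    rw [List.filter_eq_nil_iff]; simp
  constructor
  · rintro ⟨⟨cd, hcd, hd⟩, ⟨c0, hc0, hnd0, hp0⟩, hall⟩
    have hmem0 : c0 ∈ ts.filter (fun c => !PySem.Chars.isdigit c) :=
      List.mem_filter.mpr ⟨hc0, by simp [hnd0]⟩
    have hne : ts.filter (fun c => !PySem.Chars.isdigit c) ≠ [] :=
      List.ne_nil_of_mem hmem0
    refine ⟨⟨fun h => by simpa [hd] using (hself.mp h) cd hcd, hne⟩, ?_⟩
    rw [rest_eq_pyRepeat_iff _ _ hne]
    refine ⟨c0, hp0.symm, fun x hx => ?_⟩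
    obtain ⟨hxts, hxnd⟩ := List.mem_filter.mp hx
    rcases hall x hxts with h | h
    · simp [h] at hxnd
    · have : [x] = [c0] := by rw [h, ← hp0]
      simpa using this
  · rintro ⟨⟨hne_ts, hne⟩, heq⟩
    obtain ⟨c, hp, hallr⟩ := (rest_eq_pyRepeat_iff _ _ hne).mp heq
    obtain ⟨x, hx⟩ := List.exists_mem_of_ne_nil _ hne
    obtain ⟨hxts, hxnd⟩ := List.mem_filter.mp hx
    have hxnd' : PySem.Chars.isdigit x = false := by simpa using hxnd
    have hxc : x = c := hallr x hx
    have hdig : ∃ c ∈ ts, PySem.Chars.isdigit c = true := by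
      by_contra h
      push Not at h
      exact hne_ts (hself.mpr fun c hc => by simpa using h c hc)
    refine ⟨hdig, ⟨x, hxts, hxnd', by rw [hxc, ← hp]⟩, fun c' hc' => ?_⟩
    by_cases hd' : PySem.Chars.isdigit c' = true
    · exact Or.inl hd'
    · have : c' ∈ ts.filter (fun c => !PySem.Chars.isdigit c) :=
        List.mem_filter.mpr ⟨hc', by simp [hd']⟩
      exact Or.inr (by rw [hallr c' this, hp])
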